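-- pv_equiv track=rewrite | github.com/lucywu12/treehacks-26 | backend/jass/tonal_tension/theory.py | triad_chroma
-- ===== SOURCE A (Python) =====
-- def triad_chroma(root_pc: int, quality: str) -> list[int]:
--     intervals = {
--         "major": [0, 4, 7],
--         "minor": [0, 3, 7],
--         "diminished": [0, 3, 6],
--         "augmented": [0, 4, 8],
--     }[quality]
--     bits = [0] * 12
--     for iv in intervals:
--         bits[(root_pc + iv) % 12] = 1
--     return bits
-- ===== SOURCE B (Python) =====
-- # 12-bit chroma masks for root pitch class 0 (bit pc set iff pc sounds):
-- # major {0,4,7}=0x091, minor {0,3,7}=0x089, diminished {0,3,6}=0x049, augmented {0,4,8}=0x111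
-- _MASKS = {"major": 0x091, "minor": 0x089, "diminished": 0x049, "augmented": 0x111}
--
-- def triad_chroma(root_pc: int, quality: str) -> list[int]:
--     m = _MASKS[quality]            # KeyError on unknown quality, like the original
--     r = root_pc % 12
--     rot = ((m << r) | (m >> (12 - r))) & 0xFFF   # rotate the 12-bit mask left by r
--     return [(rot >> pc) & 1 for pc in range(12)]
-- ===== Notes on version B (the rewrite author's own statement) =====
-- stated objective: alternative
-- what changed: B replaces the interval loop writing into a mutable 12-zero list by a precomputed 12-bit chroma bitmask per quality, rotated left by root_pc % 12 with shift/or/and, then unpacked bit by bit.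
import Mathlib
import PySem

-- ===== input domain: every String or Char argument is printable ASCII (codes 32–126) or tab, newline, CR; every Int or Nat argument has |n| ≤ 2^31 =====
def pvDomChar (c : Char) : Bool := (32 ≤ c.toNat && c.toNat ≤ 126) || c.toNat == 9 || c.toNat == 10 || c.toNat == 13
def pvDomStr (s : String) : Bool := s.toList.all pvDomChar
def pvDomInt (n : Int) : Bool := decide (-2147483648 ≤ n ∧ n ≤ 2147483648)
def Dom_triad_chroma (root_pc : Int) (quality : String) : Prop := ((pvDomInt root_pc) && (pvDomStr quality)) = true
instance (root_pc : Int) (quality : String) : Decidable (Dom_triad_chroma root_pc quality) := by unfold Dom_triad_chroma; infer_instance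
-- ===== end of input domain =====

-- B encodes each quality as a precomputed 12-bit chroma bitmask and rotates it by
-- root_pc % 12, instead of A's loop over the 3 intervals writing into a mutable list.

-- ===== PORT A =====
-- the quality -> intervals dict of A
def pvIntervals : PySem.Dict String (List Int) :=
  PySem.Dict.ofList [("major", [0, 4, 7]), ("minor", [0, 3, 7]),
                     ("diminished", [0, 3, 6]), ("augmented", [0, 4, 8])]

def triad_chroma (root_pc : Int) (quality : String) : List Int :=
  match pvIntervals.get? quality with
  | none => []  -- KeyError in Python; excluded by Pre_triad_chroma
  | some intervals =>
    intervals.foldl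
      (fun bits iv => PySem.List.pySetD bits (PySem.Int.mod (root_pc + iv) 12) 1)
      (List.replicate 12 0)

-- ===== PORT B =====
-- B's quality -> 12-bit mask dict (masks are nonnegative, so Python's shifts/&/| on them
-- are exactly Nat shiftLeft/shiftRight/land/lor)
def pvMasks : PySem.Dict String Nat :=
  PySem.Dict.ofList [("major", 0x091), ("minor", 0x089),
                     ("diminished", 0x049), ("augmented", 0x111)]

def triad_chroma_alt (root_pc : Int) (quality : String) : List Int :=
  match pvMasks.get? quality with
  | none => []  -- KeyError in Python; excluded by Pre_triad_chroma
  | some m =>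
    let r : Nat := (PySem.Int.mod root_pc 12).toNat  -- root_pc % 12 is in [0,12), toNat exact
    let rot : Nat := ((m <<< r) ||| (m >>> (12 - r))) &&& 0xFFF
    (PySem.List.pyRange 0 12 1).map (fun pc => ((rot >>> pc.toNat) &&& 1 : Nat))

-- ===== PRECONDITION & SPEC =====
-- Pre_ excludes exactly the qualities absent from the dict, on which Python A raises KeyError.
def Pre_triad_chroma (_root_pc : Int) (quality : String) : Prop :=
  quality = "major" ∨ quality = "minor" ∨ quality = "diminished" ∨ quality = "augmented"
instance (root_pc : Int) (quality : String) : Decidable (Pre_triad_chroma root_pc quality) := by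
  unfold Pre_triad_chroma; infer_instance

def pvWitness_triad_chroma : Int × String := (7, "minor")

def Spec_triad_chroma (root_pc : Int) (quality : String) (out : List Int) : Prop := out = triad_chroma_alt root_pc quality
instance (root_pc : Int) (quality : String) (out : List Int) : Decidable (Spec_triad_chroma root_pc quality out) := by unfold Spec_triad_chroma; infer_instance

-- ===== CLAIM (what is proved, stated in full; the proofs are below) =====
def Claim_equal_triad_chroma : Prop := ∀ (root_pc : Int) (quality : String), Dom_triad_chroma root_pc quality → Pre_triad_chroma root_pc quality → Spec_triad_chroma root_pc quality (triad_chroma root_pc quality)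

-- ===== LEMMAS AND PROOFS =====

-- the slot hit by interval iv depends on root_pc only through root_pc % 12
theorem pv_mod_shift (x iv : Int) :
    PySem.Int.mod (x + iv) 12 = PySem.Int.mod (PySem.Int.mod x 12 + iv) 12 := by
  rw [PySem.Int.mod_eq_emod_of_pos (b := 12) (by norm_num),
      PySem.Int.mod_eq_emod_of_pos (b := 12) (by norm_num),
      PySem.Int.mod_eq_emod_of_pos (b := 12) (by norm_num)]
  omega

theorem pv_per_quality (root_pc : Int) (quality : String)
    (hq : Pre_triad_chroma root_pc quality) :
    triad_chroma root_pc quality = triad_chroma_alt root_pc quality := by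
  have h0 : 0 ≤ PySem.Int.mod root_pc 12 := PySem.Int.mod_nonneg root_pc (by norm_num)
  have h12 : PySem.Int.mod root_pc 12 < 12 := PySem.Int.mod_lt root_pc (by norm_num)
  rcases hq with h | h | h | h <;> subst h <;>
    simp only [triad_chroma, triad_chroma_alt, pvIntervals, pvMasks, pv_mod_shift root_pc] <;>
    generalize PySem.Int.mod root_pc 12 = r at h0 h12 <;>
    interval_cases r <;> decide

-- ===== VERDICT (by name: the statement is the Claim_ definition above) =====
theorem triad_chroma_spec : Claim_equal_triad_chroma := by
  intro root_pc quality _ hpre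
  exact pv_per_quality root_pc quality hpre
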